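-- pv_equiv track=rewrite | github.com/santii-dev/VISION-PC-EPP-UCP-2025 | backend/cumplimiento.py | contar_detecciones
-- ===== SOURCE A (Python) =====
-- from typing import Dict, List
--
-- CLASES_EPP = {
--     "person": "Persona",
--     "safety helmet": "Casco",
--     "reflective vest": "Chaleco",
--     "safety vest": "Chaleco",
--     "safety glasses": "Gafas"
-- }
--
-- def contar_detecciones(clases: List[str]) -> Dict[str, int]:
--     """Cuenta las detecciones de cada tipo de EPP"""
--     conteo = {
--         "personas": 0,
--         "cascos": 0,
--         "chalecos": 0,  # Suma de reflective vest + safety vest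
--         "gafas": 0
--     }
--
--     for clase in clases:
--         clase_normalizada = CLASES_EPP.get(clase, "")
--
--         if clase_normalizada == "Persona":
--             conteo["personas"] += 1
--         elif clase_normalizada == "Casco":
--             conteo["cascos"] += 1
--         elif clase_normalizada == "Chaleco":
--             conteo["chalecos"] += 1
--         elif clase_normalizada == "Gafas":
--             conteo["gafas"] += 1
--
--     return conteo
-- ===== SOURCE B (Python) =====
-- def contar_detecciones(clases):
--     """Cuenta las detecciones de cada tipo de EPP (count-then-assemble)."""
--     return {
--         "personas": clases.count("person"),
--         "cascos": clases.count("safety helmet"),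
--         "chalecos": clases.count("reflective vest") + clases.count("safety vest"),
--         "gafas": clases.count("safety glasses"),
--     }
-- ===== Notes on version B (the rewrite author's own statement) =====
-- stated objective: idiomatic
-- what changed: Replaced the per-element normalize-via-CLASES_EPP then if/elif increment loop with a count-then-assemble decomposition: the result dict is built directly from list.count of each raw class name, summing the two vest classes.
import Mathlib
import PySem

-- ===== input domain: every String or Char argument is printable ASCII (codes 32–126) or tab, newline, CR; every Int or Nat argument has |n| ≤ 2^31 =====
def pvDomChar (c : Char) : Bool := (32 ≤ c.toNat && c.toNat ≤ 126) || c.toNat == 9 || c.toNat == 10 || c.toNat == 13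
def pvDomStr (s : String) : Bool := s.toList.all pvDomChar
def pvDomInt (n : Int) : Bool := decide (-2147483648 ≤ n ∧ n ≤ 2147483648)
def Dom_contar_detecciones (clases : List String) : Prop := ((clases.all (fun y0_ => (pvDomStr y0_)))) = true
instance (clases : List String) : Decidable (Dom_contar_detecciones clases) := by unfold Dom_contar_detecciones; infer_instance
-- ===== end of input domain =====

-- B builds the same counts by direct list.count assembly instead of A's normalize-then-if/elif loop; idiomatic, same O(n) value.
-- ===== PORT A =====
def pvCLASES_EPP : PySem.Dict String String :=
  PySem.Dict.mk [("person", "Persona"), ("safety helmet", "Casco"),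
                 ("reflective vest", "Chaleco"), ("safety vest", "Chaleco"),
                 ("safety glasses", "Gafas")]

def pvStepA (conteo : PySem.Dict String Int) (clase : String) : PySem.Dict String Int :=
  let clase_normalizada := pvCLASES_EPP.getD clase ""
  if clase_normalizada = "Persona" then conteo.modify "personas" 0 (· + 1)
  else if clase_normalizada = "Casco" then conteo.modify "cascos" 0 (· + 1)
  else if clase_normalizada = "Chaleco" then conteo.modify "chalecos" 0 (· + 1)
  else if clase_normalizada = "Gafas" then conteo.modify "gafas" 0 (· + 1)
  else conteo

def contar_detecciones (clases : List String) : List (String × Int) :=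
  (clases.foldl pvStepA
    (PySem.Dict.mk [("personas", 0), ("cascos", 0), ("chalecos", 0), ("gafas", 0)])).items

-- ===== PORT B =====
def contar_detecciones_alt (clases : List String) : List (String × Int) :=
  [("personas", (PySem.List.count clases "person" : Int)),
   ("cascos", (PySem.List.count clases "safety helmet" : Int)),
   ("chalecos", (PySem.List.count clases "reflective vest" : Int)
               + (PySem.List.count clases "safety vest" : Int)),
   ("gafas", (PySem.List.count clases "safety glasses" : Int))]

-- ===== PRECONDITION & SPEC =====
def Spec_contar_detecciones (clases : List String) (out : List (String × Int)) : Prop := out = contar_detecciones_alt clases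
instance (clases : List String) (out : List (String × Int)) : Decidable (Spec_contar_detecciones clases out) := by unfold Spec_contar_detecciones; infer_instance

-- ===== CLAIM (what is proved, stated in full; the proofs are below) =====
def Claim_equal_contar_detecciones : Prop := ∀ (clases : List String), Dom_contar_detecciones clases → Spec_contar_detecciones clases (contar_detecciones clases)

-- ===== LEMMAS AND PROOFS =====

lemma pvFoldA (clases : List String) (p c ch g : Int) :
    (clases.foldl pvStepA
      (PySem.Dict.mk [("personas", p), ("cascos", c), ("chalecos", ch), ("gafas", g)])).items =
    [("personas", p + clases.count "person"),
     ("cascos", c + clases.count "safety helmet"),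
     ("chalecos", ch + clases.count "reflective vest" + clases.count "safety vest"),
     ("gafas", g + clases.count "safety glasses")] := by
  induction clases generalizing p c ch g with
  | nil => simp
  | cons x xs ih =>
    by_cases h1 : x = "person"
    · subst h1
      simp only [List.foldl_cons, pvStepA, pvCLASES_EPP, PySem.Dict.getD, PySem.Dict.get?,
        PySem.Dict.modify, PySem.Dict.insert, PySem.Dict.contains,
        List.find?, List.count_cons]
      simp [ih]
      omega
    · by_cases h2 : x = "safety helmet"
      · subst h2
        simp only [List.foldl_cons, pvStepA, pvCLASES_EPP, PySem.Dict.getD, PySem.Dict.get?,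
          PySem.Dict.modify, PySem.Dict.insert, PySem.Dict.contains,
          List.find?, List.count_cons]
        simp [ih]
        omega
      · by_cases h3 : x = "reflective vest"
        · subst h3
          simp only [List.foldl_cons, pvStepA, pvCLASES_EPP, PySem.Dict.getD, PySem.Dict.get?,
            PySem.Dict.modify, PySem.Dict.insert, PySem.Dict.contains,
            List.find?, List.count_cons]
          simp [ih]
          omega
        · by_cases h4 : x = "safety vest"
          · subst h4
            simp only [List.foldl_cons, pvStepA, pvCLASES_EPP, PySem.Dict.getD, PySem.Dict.get?,
              PySem.Dict.modify, PySem.Dict.insert, PySem.Dict.contains,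
              List.find?, List.count_cons]
            simp [ih]
            omega
          · by_cases h5 : x = "safety glasses"
            · subst h5
              simp only [List.foldl_cons, pvStepA, pvCLASES_EPP, PySem.Dict.getD, PySem.Dict.get?,
                PySem.Dict.modify, PySem.Dict.insert, PySem.Dict.contains,
                List.find?, List.count_cons]
              simp [ih]
              omega
            · have e1 : ("person" == x) = false := by
                rw [beq_eq_false_iff_ne]; exact fun h => h1 h.symm
              have e2 : ("safety helmet" == x) = false := by
                rw [beq_eq_false_iff_ne]; exact fun h => h2 h.symm
              have e3 : ("reflective vest" == x) = false := by
                rw [beq_eq_false_iff_ne]; exact fun h => h3 h.symm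
              have e4 : ("safety vest" == x) = false := by
                rw [beq_eq_false_iff_ne]; exact fun h => h4 h.symm
              have e5 : ("safety glasses" == x) = false := by
                rw [beq_eq_false_iff_ne]; exact fun h => h5 h.symm
              simp only [List.foldl_cons, pvStepA, pvCLASES_EPP, PySem.Dict.getD, PySem.Dict.get?,
                List.find?, e1, e2, e3, e4, e5]
              simp [ih, h1, h2, h3, h4, h5]

-- ===== VERDICT =====
theorem contar_detecciones_spec : Claim_equal_contar_detecciones := by
  intro clases _
  unfold Spec_contar_detecciones contar_detecciones contar_detecciones_alt
  rw [pvFoldA]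
  simp [PySem.List.count_eq]
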